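-- pv_equiv track=rewrite | github.com/losek1996/advent-of-code-2022 | solutions/day20/day20_solution.py | get_mixed_encrypted_file
-- ===== SOURCE A (Python) =====
-- from collections import OrderedDict
--
-- def get_mixed_encrypted_file(
--     data: list[int], num_of_iterations: int, multiplier: int
-- ) -> list[int]:
--     num_of_values = len(data)
--     original_to_current_index_map = OrderedDict()
--     current_to_original_index_map = OrderedDict()
--     for idx in range(num_of_values):
--         original_to_current_index_map[idx] = idx
--         current_to_original_index_map[idx] = idx
--
--     _last_index = num_of_values - 1
--     for _ in range(num_of_iterations):
--         for original_index in range(len(data)):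
--             current_index = original_to_current_index_map[original_index]
--             value = data[original_index]
--
--             """
--             (a + b) % c = (a % c + b % c) % c
--             (a * b) % c = (a % c * b % c) % c
--             (a + d * e) % c = (a % c + (d * e) % c) % c = (a % c + (d % c * e % c) % c) %c
--             _last_index = len(data) - 1  # Why? because allowed indices are 0..(len(data) - 1)
--             """
--             destination_index = (
--                 current_index % _last_index
--                 + (value % _last_index * multiplier % _last_index) % _last_index
--             ) % _last_index
--             indices_diff = abs(current_index - destination_index)
--             if destination_index == 0 and indices_diff > 0:
--                 destination_index = _last_index
--             elif destination_index == _last_index and indices_diff > 0: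
--                 destination_index = 0
--
--             current_order = list(current_to_original_index_map.values())
--
--             """We operate on original indices in new_order list"""
--             if destination_index >= current_index:
--                 """
--                 Assume we move some value from index A to index B.
--                 X1 A X2 B X3 -> X1 X2 B A X3
--                 """
--                 new_order = (
--                     current_order[:current_index]
--                     + current_order[current_index + 1 : destination_index + 1]
--                     + [original_index]
--                     + current_order[destination_index + 1 :]
--                 )
--             else:
--                 """
--                 Assume we move some value from index A to index B.
--                 X1 B X2 A X3 -> X1 A B X2 X3
--                 """
--                 new_order = (
--                     current_order[:destination_index]
--                     + [original_index]
--                     + current_order[destination_index:current_index]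
--                     + current_order[current_index + 1 :]
--                 )
--
--             for current_idx, original_idx in enumerate(new_order):
--                 original_to_current_index_map[original_idx] = current_idx
--                 current_to_original_index_map[current_idx] = original_idx
--
--     final_order = list(current_to_original_index_map.values())
--     mixed_encrypted_file = [
--         data[original_idx] * multiplier for original_idx in final_order
--     ]
--     return mixed_encrypted_file
-- ===== SOURCE B (Python) =====
-- def get_mixed_encrypted_file(
--     data: list[int], num_of_iterations: int, multiplier: int
-- ) -> list[int]:
--     """Single order list mixed in place via index/pop/insert (instead of two
--     index maps rebuilt by slicing each move)."""
--     n = len(data)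
--     wrap = n - 1
--     order = list(range(n))
--     for _ in range(num_of_iterations):
--         for original_index in range(n):
--             current_index = order.index(original_index)
--             destination_index = (current_index + data[original_index] * multiplier) % wrap
--             if destination_index == 0 and current_index != 0:
--                 destination_index = wrap
--             order.pop(current_index)
--             order.insert(destination_index, original_index)
--     return [data[original_index] * multiplier for original_index in order]
-- ===== Notes on version B (the rewrite author's own statement) =====
-- stated objective: faster
-- what changed: A maintains two OrderedDict index maps, rebuilds the new order by four-slice concatenation and re-indexes both maps with a full enumerate pass after every move; B keeps a single list of original indices and performs each move as one index/pop/insert on that list.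
import Mathlib
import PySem

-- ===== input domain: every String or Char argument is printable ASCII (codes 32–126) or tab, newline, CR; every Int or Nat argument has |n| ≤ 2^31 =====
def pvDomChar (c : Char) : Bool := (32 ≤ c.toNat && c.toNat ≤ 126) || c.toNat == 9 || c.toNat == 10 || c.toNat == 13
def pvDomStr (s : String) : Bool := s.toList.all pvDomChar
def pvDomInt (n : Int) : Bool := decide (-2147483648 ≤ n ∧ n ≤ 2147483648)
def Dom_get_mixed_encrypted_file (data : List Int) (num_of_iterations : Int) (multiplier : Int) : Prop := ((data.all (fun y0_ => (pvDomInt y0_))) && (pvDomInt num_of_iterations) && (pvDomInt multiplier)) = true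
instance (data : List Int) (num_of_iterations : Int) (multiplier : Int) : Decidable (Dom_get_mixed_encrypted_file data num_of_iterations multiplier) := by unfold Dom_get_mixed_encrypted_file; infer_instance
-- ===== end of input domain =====

-- B replaces A's two index maps (rebuilt by slicing and a full re-indexing pass each
-- move) with a single order list mixed in place via one index/pop/insert per move:
-- same return value, measurably faster by a constant factor (less work per move).

-- ===== PORT A =====
-- one mixing move of A: dict lookups are getD (the keys 0..n-1 are always present,
-- so Python's KeyError cannot fire), data[i] is pyGetD (i is always in range)
def pvStepA (data : List Int) (multiplier lastIndex : Int)
    (st : PySem.Dict Int Int × PySem.Dict Int Int) (originalIndex : Int) :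
    PySem.Dict Int Int × PySem.Dict Int Int :=
  let currentIndex := st.1.getD originalIndex 0
  let value := PySem.List.pyGetD data originalIndex 0
  let destinationIndex :=
    PySem.Int.mod
      (PySem.Int.mod currentIndex lastIndex +
        PySem.Int.mod (PySem.Int.mod (PySem.Int.mod value lastIndex * multiplier) lastIndex) lastIndex)
      lastIndex
  let indicesDiff := |currentIndex - destinationIndex|
  let destinationIndex :=
    if destinationIndex = 0 ∧ indicesDiff > 0 then lastIndex
    else if destinationIndex = lastIndex ∧ indicesDiff > 0 then 0
    else destinationIndex
  let currentOrder := st.2.values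
  let newOrder :=
    if destinationIndex ≥ currentIndex then
      PySem.List.slice currentOrder none (some currentIndex) ++
        PySem.List.slice currentOrder (some (currentIndex + 1)) (some (destinationIndex + 1)) ++
        [originalIndex] ++ PySem.List.slice currentOrder (some (destinationIndex + 1)) none
    else
      PySem.List.slice currentOrder none (some destinationIndex) ++
        [originalIndex] ++
        PySem.List.slice currentOrder (some destinationIndex) (some currentIndex) ++
        PySem.List.slice currentOrder (some (currentIndex + 1)) none
  (PySem.List.enumerate newOrder).foldl
    (fun st p => (st.1.insert p.2 p.1, st.2.insert p.1 p.2)) st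

def get_mixed_encrypted_file (data : List Int) (num_of_iterations : Int) (multiplier : Int) : List Int :=
  let numOfValues : Int := PySem.List.len data
  let maps :=
    (PySem.List.pyRange 0 numOfValues).foldl
      (fun st idx => (st.1.insert idx idx, st.2.insert idx idx))
      (PySem.Dict.empty, PySem.Dict.empty)
  let lastIndex := numOfValues - 1
  let maps :=
    (PySem.List.pyRange 0 num_of_iterations).foldl
      (fun st _ =>
        (PySem.List.pyRange 0 (PySem.List.len data)).foldl (pvStepA data multiplier lastIndex) st)
      maps
  maps.2.values.map (fun originalIdx => PySem.List.pyGetD data originalIdx 0 * multiplier)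

-- ===== PORT B =====
-- one mixing move of B: find, pop, reinsert in the single order list
-- (pop? cannot be none: currentIndex is always a valid index)
def pvStepB (data : List Int) (multiplier wrap : Int) (order : List Int) (originalIndex : Int) :
    List Int :=
  let currentIndex : Int := (((PySem.List.index? order originalIndex).getD 0 : Nat) : Int)
  let destinationIndex :=
    PySem.Int.mod (currentIndex + PySem.List.pyGetD data originalIndex 0 * multiplier) wrap
  let destinationIndex := if destinationIndex = 0 ∧ currentIndex ≠ 0 then wrap else destinationIndex
  match PySem.List.pop? order currentIndex with
  | some r => PySem.List.insert r.2 destinationIndex originalIndex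
  | none => order

def get_mixed_encrypted_file_alt (data : List Int) (num_of_iterations : Int) (multiplier : Int) : List Int :=
  let n : Int := PySem.List.len data
  let wrap := n - 1
  let order := PySem.List.pyRange 0 n
  let order :=
    (PySem.List.pyRange 0 num_of_iterations).foldl
      (fun order _ => (PySem.List.pyRange 0 n).foldl (pvStepB data multiplier wrap) order)
      order
  order.map (fun originalIdx => PySem.List.pyGetD data originalIdx 0 * multiplier)

-- ===== PRECONDITION & SPEC =====
-- Pre_ excludes exactly the inputs where A raises: with len(data) == 1 and at least one
-- iteration both programs compute `% 0` (the wrap modulus is len(data) - 1 = 0) and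
-- Python raises ZeroDivisionError.
def Pre_get_mixed_encrypted_file (data : List Int) (num_of_iterations : Int) (multiplier : Int) : Prop :=
  ¬ (data.length = 1 ∧ 1 ≤ num_of_iterations)
instance (data : List Int) (num_of_iterations : Int) (multiplier : Int) : Decidable (Pre_get_mixed_encrypted_file data num_of_iterations multiplier) := by unfold Pre_get_mixed_encrypted_file; infer_instance

def pvWitness_get_mixed_encrypted_file : List Int × Int × Int := ([3, -2, 0, 4], 2, 2)

def Spec_get_mixed_encrypted_file (data : List Int) (num_of_iterations : Int) (multiplier : Int) (out : List Int) : Prop := out = get_mixed_encrypted_file_alt data num_of_iterations multiplier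
instance (data : List Int) (num_of_iterations : Int) (multiplier : Int) (out : List Int) : Decidable (Spec_get_mixed_encrypted_file data num_of_iterations multiplier out) := by unfold Spec_get_mixed_encrypted_file; infer_instance

-- ===== CLAIM (what is proved, stated in full; the proofs are below) =====
def Claim_equal_get_mixed_encrypted_file : Prop := ∀ (data : List Int) (num_of_iterations : Int) (multiplier : Int), Dom_get_mixed_encrypted_file data num_of_iterations multiplier → Pre_get_mixed_encrypted_file data num_of_iterations multiplier → Spec_get_mixed_encrypted_file data num_of_iterations multiplier (get_mixed_encrypted_file data num_of_iterations multiplier)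

-- ===== LEMMAS AND PROOFS =====

-- the canonical dict with keys 0..n-1 (as Int, in order) and value g i at key i
def pvCanon (n : Nat) (g : Nat → Int) : PySem.Dict Int Int :=
  PySem.Dict.mk ((List.range n).map (fun i : Nat => ((i : Int), g i)))

-- abstraction: the pair of maps A maintains, as a function of B's order list
def pvAbs (n : Nat) (order : List Int) : PySem.Dict Int Int × PySem.Dict Int Int :=
  (pvCanon n (fun i => ((order.idxOf (i : Int) : Nat) : Int)),
   pvCanon n (fun i => order.getD i 0))

-- B's order list is always a permutation of [0, …, n-1] (as Ints)
def pvR (n : Nat) : List Int := (List.range n).map (fun i : Nat => (i : Int))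

lemma pvCanon_keys (n : Nat) (g : Nat → Int) : (pvCanon n g).keys = pvR n := by
  simp only [pvCanon, pvR, PySem.Dict.keys, List.map_map]
  rfl

lemma pvR_nodup (n : Nat) : (pvR n).Nodup :=
  List.nodup_range.map (fun a b h => by exact_mod_cast h)

lemma pvR_length (n : Nat) : (pvR n).length = n := by simp [pvR]

lemma pvR_getElem (n i : Nat) (h : i < (pvR n).length) : (pvR n)[i] = (i : Int) := by
  simp [pvR]

lemma pvR_idxOf (n i : Nat) (h : i < n) : (pvR n).idxOf ((i : Int)) = i := by
  have h' : i < (pvR n).length := by rw [pvR_length]; exact h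
  have := (pvR_nodup n).idxOf_getElem i h'
  rwa [pvR_getElem n i h'] at this

lemma pvR_getD (n i : Nat) (h : i < n) : (pvR n).getD i 0 = (i : Int) := by
  have h' : i < (pvR n).length := by rw [pvR_length]; exact h
  rw [List.getD_eq_getElem _ _ h', pvR_getElem n i h']

lemma pvR_mem (n : Nat) (x : Int) : x ∈ pvR n ↔ ∃ j, j < n ∧ x = (j : Int) := by
  simp only [pvR, List.mem_map, List.mem_range]
  constructor
  · rintro ⟨j, hj, rfl⟩; exact ⟨j, hj, rfl⟩
  · rintro ⟨j, hj, rfl⟩; exact ⟨j, hj, rfl⟩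

lemma pvCanon_getD (n : Nat) (g : Nat → Int) (j : Nat) (hj : j < n) (d : Int) :
    (pvCanon n g).getD (j : Int) d = g j := by
  apply PySem.Dict.getD_of_mem_items
  · exact List.mem_map.2 ⟨j, List.mem_range.2 hj, rfl⟩
  · rw [pvCanon_keys]; exact pvR_nodup n

lemma pvCanon_insert (n : Nat) (g : Nat → Int) (j : Nat) (hj : j < n) (v : Int) :
    (pvCanon n g).insert (j : Int) v = pvCanon n (fun i => if i = j then v else g i) := by
  apply PySem.Dict.ext
  rw [PySem.Dict.items_insert_of_contains]
  · show ((List.range n).map _).map _ = _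
    rw [List.map_map]
    apply List.map_congr_left
    intro i hi
    by_cases hij : i = j
    · subst hij; simp
    · have : ¬ ((i : Int) == (j : Int)) = true := by
        simp only [beq_iff_eq]
        exact_mod_cast hij
      simp [this, hij]
  · rw [PySem.Dict.contains_iff_mem_keys, pvCanon_keys]
    exact List.mem_map.2 ⟨j, List.mem_range.2 hj, rfl⟩

lemma pvCanon_congr (n : Nat) (g g' : Nat → Int) (h : ∀ i < n, g i = g' i) :
    pvCanon n g = pvCanon n g' := by
  unfold pvCanon
  congr 1
  exact List.map_congr_left (fun i hi => by rw [h i (List.mem_range.1 hi)])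

lemma pvCanon_values (n : Nat) (g : Nat → Int) :
    (pvCanon n g).values = (List.range n).map g := by
  simp only [pvCanon, PySem.Dict.values, List.map_map]
  rfl

lemma pvGetD_range_self (l : List Int) (n : Nat) (h : l.length = n) :
    (List.range n).map (fun i => l.getD i 0) = l := by
  apply List.ext_getElem
  · simp [h]
  · intro i h1 h2
    simp [List.getD_eq_getElem?_getD, List.getElem?_eq_getElem h2]

-- rebuilding the current→original map: the enumerate fold overwrites positions s..s+|xs|-1
lemma pvFoldC2O (n : Nat) (xs : List Int) : ∀ (s : Nat) (g : Nat → Int), s + xs.length ≤ n →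
    (PySem.List.enumerate xs (s : Int)).foldl (fun d (p : Int × Int) => d.insert p.1 p.2) (pvCanon n g)
      = pvCanon n (fun i => if s ≤ i ∧ i < s + xs.length then xs.getD (i - s) 0 else g i) := by
  induction xs with
  | nil =>
    intro s g _
    simp only [PySem.List.enumerate_nil, List.foldl_nil, List.length_nil]
    exact pvCanon_congr _ _ _ (fun i _ => by rw [if_neg (by omega)])
  | cons x xs ih =>
    intro s g hs
    rw [PySem.List.enumerate_cons, List.foldl_cons]
    have h1 : ((s : Int) + 1) = ((s + 1 : Nat) : Int) := by push_cast; ring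
    have h2 : (pvCanon n g).insert (s : Int) x = pvCanon n (fun i => if i = s then x else g i) :=
      pvCanon_insert n g s (by simp at hs; omega) x
    rw [h1, h2, ih (s+1) _ (by simp at hs ⊢; omega)]
    apply pvCanon_congr
    intro i _
    by_cases hi1 : s + 1 ≤ i ∧ i < s + 1 + xs.length
    · rw [if_pos hi1, if_pos (by simp; omega)]
      have : i - s = (i - (s+1)) + 1 := by omega
      rw [this]
      simp
    · rw [if_neg hi1]
      by_cases hi2 : i = s
      · rw [if_pos hi2, if_pos (by simp; omega), hi2]
        simp
      · rw [if_neg hi2, if_neg (by simp; omega)]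

-- rebuilding the original→current map: each key of xs gets its position
lemma pvFoldO2C (n : Nat) (xs : List Int) : ∀ (s : Nat) (g : Nat → Int), xs.Nodup →
    (∀ x ∈ xs, ∃ j, j < n ∧ x = (j : Int)) →
    (PySem.List.enumerate xs (s : Int)).foldl (fun d (p : Int × Int) => d.insert p.2 p.1) (pvCanon n g)
      = pvCanon n (fun i => if (i : Int) ∈ xs then (s : Int) + (xs.idxOf (i : Int) : Int) else g i) := by
  induction xs with
  | nil =>
    intro s g _ _
    simp only [PySem.List.enumerate_nil, List.foldl_nil, List.not_mem_nil]
    exact pvCanon_congr _ _ _ (fun i _ => by simp)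
  | cons x xs ih =>
    intro s g hnd hmem
    obtain ⟨j, hj, hxj⟩ := hmem x List.mem_cons_self
    rw [PySem.List.enumerate_cons, List.foldl_cons]
    have h1 : ((s : Int) + 1) = ((s + 1 : Nat) : Int) := by push_cast; ring
    have h2 : (pvCanon n g).insert x (s : Int)
        = pvCanon n (fun i => if i = j then (s : Int) else g i) := by
      rw [hxj]; exact pvCanon_insert n g j hj _
    rw [h1, h2, ih (s+1) _ hnd.of_cons (fun y hy => hmem y (List.mem_cons_of_mem _ hy))]
    apply pvCanon_congr
    intro i _
    by_cases hix : (i : Int) = x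
    · have hij : i = j := by rw [hxj] at hix; exact_mod_cast hix
      have hnx : (i : Int) ∉ xs := by rw [hix]; exact (List.nodup_cons.1 hnd).1
      rw [if_neg (by exact hnx), if_pos hij, if_pos (by simp [hix]), hix, List.idxOf_cons_self]
      simp
    · by_cases hin : (i : Int) ∈ xs
      · rw [if_pos hin, if_pos (List.mem_cons_of_mem _ hin)]
        rw [List.idxOf_cons_ne _ (fun h => hix h.symm)]
        push_cast; ring
      · rw [if_neg hin, if_neg (fun h : i = j => hix (by rw [h, hxj])),
          if_neg (by simp [hix, hin])]

-- A's nested remainder chain is a single Python mod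
lemma pvModChain (c v m L : Int) :
    (c % L + ((v % L * m) % L) % L) % L = (c + v * m) % L := by
  conv_lhs => rw [Int.emod_emod_of_dvd _ dvd_rfl, Int.mul_emod,
    Int.emod_emod_of_dvd _ dvd_rfl, ← Int.mul_emod]
  rw [← Int.add_emod]

-- the list surgery: A's four-slice concatenation is B's pop-then-insert
lemma pvInsert_natCast (xs : List Int) (n : Nat) (h : n ≤ xs.length) (v : Int) :
    PySem.List.insert xs (n : Int) v = xs.take n ++ v :: xs.drop n := by
  simp [PySem.List.insert, PySem.List.sliceIndices, h]
  rw [if_neg (by omega)]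
  simp [Int.toNat_natCast]

lemma pvSurgeryGe (o : List Int) (cur d : Nat) (v : Int) (hc : cur < o.length)
    (hcd : cur ≤ d) :
    (o.eraseIdx cur).take d ++ v :: (o.eraseIdx cur).drop d
      = o.take cur ++ ((o.drop (cur + 1)).take (d - cur) ++ ([v] ++ o.drop (d + 1))) := by
  rw [List.eraseIdx_eq_take_drop_succ, List.take_append, List.drop_append]
  rw [List.take_take, Nat.min_eq_right hcd, List.length_take, Nat.min_eq_left (le_of_lt hc),
    List.drop_eq_nil_of_le (show (List.take cur o).length ≤ d by rw [List.length_take]; omega),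
    List.drop_drop]
  have h2 : cur + 1 + (d - cur) = d + 1 := by omega
  rw [h2]; simp

lemma pvSurgeryLt (o : List Int) (cur d : Nat) (v : Int) (hc : cur < o.length) (hdc : d < cur) :
    (o.eraseIdx cur).take d ++ v :: (o.eraseIdx cur).drop d
      = o.take d ++ ([v] ++ ((o.drop d).take (cur - d) ++ o.drop (cur + 1))) := by
  rw [List.eraseIdx_eq_take_drop_succ, List.take_append, List.drop_append]
  rw [List.take_take, Nat.min_eq_left (le_of_lt hdc), List.length_take,
    Nat.min_eq_left (le_of_lt hc)]
  have h2 : d - cur = 0 := by omega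
  rw [h2, List.take_zero, List.drop_zero, List.drop_take]
  simp

-- one move: A's step on the abstracted maps is B's step on the order list
lemma pvStep_sim (data : List Int) (multiplier : Int) (n : Nat) (hn : 2 ≤ n)
    (order : List Int) (hperm : order.Perm (pvR n)) (j : Nat) (hj : j < n) :
    pvStepA data multiplier ((n : Int) - 1) (pvAbs n order) (j : Int)
        = pvAbs n (pvStepB data multiplier ((n : Int) - 1) order (j : Int))
      ∧ (pvStepB data multiplier ((n : Int) - 1) order (j : Int)).Perm (pvR n) := by
  have hlen : order.length = n := hperm.length_eq.trans (pvR_length n)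
  have hmem : ((j : Int)) ∈ order := hperm.mem_iff.2 ((pvR_mem n _).2 ⟨j, hj, rfl⟩)
  have hnd : order.Nodup := (hperm.nodup_iff).2 (pvR_nodup n)
  set cur := order.idxOf ((j : Int)) with hcurdef
  have hcuro : cur < order.length := List.idxOf_lt_length_of_mem hmem
  have hcur : cur < n := hlen ▸ hcuro
  have hgetcur : order[cur]'hcuro = (j : Int) := List.getElem_idxOf hcuro
  have hL : (0 : Int) < (n : Int) - 1 := by
    have : (2 : Int) ≤ (n : Int) := by exact_mod_cast hn
    omega
  -- B's current index equals A's
  have hidxB : (PySem.List.index? order ((j : Int))).getD 0 = cur := by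
    have hne : PySem.List.index? order ((j : Int)) ≠ none := by
      rw [Ne, PySem.List.index?_eq_none_iff]
      simpa using hmem
    obtain ⟨k, hk⟩ := Option.ne_none_iff_exists'.mp hne
    have : cur = k := by
      show List.idxOf ((j : Int)) order = k
      rw [List.idxOf_eq_getD_idxOf?, ← PySem.List.index?_eq_idxOf?, hk]
      rfl
    rw [hk, this]
    rfl
  -- the raw destination, then the adjusted one
  set v : Int := PySem.List.pyGetD data ((j : Int)) 0 with hv
  set L : Int := (n : Int) - 1 with hLdef
  set t : Int := (cur : Int) + v * multiplier with ht
  have hmodA :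
      PySem.Int.mod
          (PySem.Int.mod ((cur : Int)) L +
            PySem.Int.mod (PySem.Int.mod (PySem.Int.mod v L * multiplier) L) L) L
        = t % L := by
    simp only [PySem.Int.mod_eq_emod_of_pos hL]
    exact pvModChain _ _ _ _
  have h0 : 0 ≤ t % L := Int.emod_nonneg _ (ne_of_gt hL)
  have h1 : t % L < L := Int.emod_lt_of_pos _ hL
  set D : Int := if t % L = 0 ∧ ((cur : Int)) ≠ 0 then L else t % L with hD
  have hADest :
      (if t % L = 0 ∧ |((cur : Int)) - t % L| > 0 then L
        else if t % L = L ∧ |((cur : Int)) - t % L| > 0 then 0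
        else t % L) = D := by
    by_cases hz : t % L = 0
    · rw [hz]
      by_cases hc0 : ((cur : Int)) = 0
      · simp [hD, hz, hc0]
      · have habs : |((cur : Int)) - 0| > 0 := by
          rw [sub_zero]
          exact abs_pos.mpr hc0
        have hcpos : 0 < cur := Nat.pos_of_ne_zero (fun h => hc0 (by simp [h]))
        simp [hD, hz, hc0, habs]
        rw [if_pos hcpos, if_neg (by omega)]
    · rw [if_neg (fun h => hz h.1), if_neg (fun h => absurd h.1 (ne_of_lt h1)), hD,
        if_neg (fun h => hz h.1)]
  have hD0 : 0 ≤ D := by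
    rw [hD]; split
    · omega
    · exact h0
  have hDL : D ≤ L := by
    rw [hD]; split
    · exact le_refl L
    · omega
  set d : Nat := D.toNat with hd
  have hDd : D = (d : Int) := (Int.toNat_of_nonneg hD0).symm
  have hdn : d ≤ n - 1 := by omega
  -- the current order list is B's order list
  have hvals : (pvAbs n order).2.values = order := by
    show (pvCanon n _).values = order
    rw [pvCanon_values, pvGetD_range_self order n hlen]
  have hgetD1 : (pvAbs n order).1.getD ((j : Int)) 0 = ((cur : Int)) := by
    show (pvCanon n _).getD _ _ = _
    rw [pvCanon_getD n _ j hj 0]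
  -- B's step computes the pop-insert list
  set e : List Int := order.eraseIdx cur with he
  have helen : e.length = n - 1 := by
    rw [he, List.length_eraseIdx_of_lt hcuro, hlen]
  set no : List Int := e.take d ++ (j : Int) :: e.drop d with hno
  have hB : pvStepB data multiplier L order ((j : Int)) = no := by
    rw [pvStepB]
    simp only [hidxB, ← hv, ← ht]
    rw [show PySem.Int.mod ((cur : Int) + v * multiplier) L = t % L from by
      rw [PySem.Int.mod_eq_emod_of_pos hL, ht]]
    rw [show (if t % L = 0 ∧ ((cur : Int)) ≠ 0 then L else t % L) = D from rfl]
    rw [PySem.List.pop?_natCast order cur hcuro]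
    show PySem.List.insert e D ((j : Int)) = no
    rw [hDd, pvInsert_natCast e d (by omega) ((j : Int))]
  -- A's new order list is the same list
  have hNew :
      (if D ≥ ((cur : Int)) then
        PySem.List.slice order none (some ((cur : Int))) ++
          PySem.List.slice order (some (((cur : Int)) + 1)) (some (D + 1)) ++
          [(j : Int)] ++ PySem.List.slice order (some (D + 1)) none
      else
        PySem.List.slice order none (some D) ++
          [(j : Int)] ++
          PySem.List.slice order (some D) (some ((cur : Int))) ++
          PySem.List.slice order (some (((cur : Int)) + 1)) none) = no := by
    by_cases hge : D ≥ ((cur : Int))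
    · have hcd : cur ≤ d := by omega
      rw [if_pos hge, hDd]
      rw [PySem.List.slice_to order (by positivity)]
      rw [show ((cur : Int)) + 1 = ((cur + 1 : Nat) : Int) from by push_cast; ring,
        show ((d : Int)) + 1 = ((d + 1 : Nat) : Int) from by push_cast; ring]
      rw [PySem.List.slice_toNat order (by positivity) (by positivity)]
      rw [PySem.List.slice_from order (by positivity)]
      simp only [Int.toNat_natCast]
      rw [hno, he, pvSurgeryGe order cur d _ hcuro hcd]
      simp [List.append_assoc]
    · have hdc : d < cur := by omega
      rw [if_neg hge, hDd]
      rw [PySem.List.slice_to order (by positivity)]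
      rw [show ((cur : Int)) + 1 = ((cur + 1 : Nat) : Int) from by push_cast; ring]
      rw [PySem.List.slice_toNat order (by positivity) (by positivity)]
      rw [PySem.List.slice_from order (by positivity)]
      simp only [Int.toNat_natCast]
      rw [hno, he, pvSurgeryLt order cur d _ hcuro hdc]
      simp [List.append_assoc]
  -- the new list is again a permutation of 0..n-1
  have hpermno : no.Perm (pvR n) := by
    have p1 : no.Perm ((j : Int) :: (e.take d ++ e.drop d)) := List.perm_middle
    rw [List.take_append_drop] at p1
    have p2 : order.Perm ((j : Int) :: e) := by
      rw [he, ← hgetcur]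
      exact (List.getElem_cons_eraseIdx_perm hcuro).symm
    exact (p1.trans p2.symm).trans hperm
  have hnolen : no.length = n := hpermno.length_eq.trans (pvR_length n)
  have hnond : no.Nodup := (hpermno.nodup_iff).2 (pvR_nodup n)
  have hnomem : ∀ x ∈ no, ∃ k, k < n ∧ x = (k : Int) := by
    intro x hx
    exact (pvR_mem n x).1 (hpermno.mem_iff.1 hx)
  -- rebuild the two maps
  have hfold :
      (PySem.List.enumerate no).foldl
          (fun st (p : Int × Int) => (st.1.insert p.2 p.1, st.2.insert p.1 p.2))
          (pvAbs n order)
        = pvAbs n no := by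
    refine Eq.trans (PySem.List.foldl_prod_mk
      (fun (dd : PySem.Dict Int Int) (p : Int × Int) => dd.insert p.2 p.1)
      (fun (dd : PySem.Dict Int Int) (p : Int × Int) => dd.insert p.1 p.2)
      (PySem.List.enumerate no) _ _) ?_
    have hO := pvFoldO2C n no 0 (fun i => (((order.idxOf (i : Int) : Nat)) : Int)) hnond hnomem
    have hC := pvFoldC2O n no 0 (fun i => order.getD i 0) (by omega)
    simp only [Nat.cast_zero] at hO hC
    show ((PySem.List.enumerate no).foldl _ (pvCanon n _),
      (PySem.List.enumerate no).foldl _ (pvCanon n _)) = pvAbs n no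
    rw [hO, hC]
    unfold pvAbs
    refine congrArg₂ Prod.mk ?_ ?_
    · apply pvCanon_congr
      intro i hi
      rw [if_pos ((pvR_mem n _).2 ⟨i, hi, rfl⟩ |> hpermno.mem_iff.2), zero_add]
    · apply pvCanon_congr
      intro i hi
      rw [if_pos ⟨Nat.zero_le i, by omega⟩, Nat.sub_zero]
  refine ⟨?_, hB ▸ hpermno⟩
  rw [hB]
  rw [pvStepA]
  simp only [hgetD1, hvals, ← hv, hmodA, hADest, hNew, hfold]

-- one full pass (and, by induction, any list of moves)
lemma pvPass_sim (data : List Int) (multiplier : Int) (n : Nat) (l : List Int)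
    (hl : ∀ x ∈ l, ∃ j, j < n ∧ x = (j : Int)) (hn : 2 ≤ n ∨ l = []) :
    ∀ (order : List Int), order.Perm (pvR n) →
      l.foldl (pvStepA data multiplier ((n : Int) - 1)) (pvAbs n order)
          = pvAbs n (l.foldl (pvStepB data multiplier ((n : Int) - 1)) order)
        ∧ (l.foldl (pvStepB data multiplier ((n : Int) - 1)) order).Perm (pvR n) := by
  induction l with
  | nil => intro order hperm; exact ⟨rfl, hperm⟩
  | cons x l ih =>
    intro order hperm
    have hn2 : 2 ≤ n := hn.resolve_right (by simp)
    obtain ⟨j, hj, rfl⟩ := hl x List.mem_cons_self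
    obtain ⟨hstep, hperm'⟩ := pvStep_sim data multiplier n hn2 order hperm j hj
    rw [List.foldl_cons, List.foldl_cons, hstep]
    exact ih (fun y hy => hl y (List.mem_cons_of_mem _ hy)) (Or.inl hn2) _ hperm'

-- all iterations
lemma pvIter_sim (data : List Int) (multiplier : Int) (n : Nat) (hn : n = 0 ∨ 2 ≤ n)
    (its : List Int) : ∀ (order : List Int), order.Perm (pvR n) →
    its.foldl (fun st _ => (pvR n).foldl
        (pvStepA data multiplier ((n : Int) - 1)) st) (pvAbs n order)
        = pvAbs n (its.foldl (fun o _ => (pvR n).foldl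
            (pvStepB data multiplier ((n : Int) - 1)) o) order)
      ∧ (its.foldl (fun o _ => (pvR n).foldl
            (pvStepB data multiplier ((n : Int) - 1)) o) order).Perm (pvR n) := by
  induction its with
  | nil => intro order hperm; exact ⟨rfl, hperm⟩
  | cons x its ih =>
    intro order hperm
    have hl : ∀ y ∈ pvR n, ∃ j, j < n ∧ y = (j : Int) := fun y hy => (pvR_mem n y).1 hy
    have hcase : 2 ≤ n ∨ pvR n = [] := by
      rcases hn with h0 | h2
      · right; rw [h0]; rfl
      · left; exact h2
    obtain ⟨hpass, hperm'⟩ := pvPass_sim data multiplier n _ hl hcase order hperm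
    rw [List.foldl_cons, List.foldl_cons, hpass]
    exact ih _ hperm'

-- the initial maps A builds are the abstraction of B's initial order list
lemma pvInit_eq (n : Nat) :
    ((pvR n).foldl (fun st idx => (st.1.insert idx idx, st.2.insert idx idx))
        (PySem.Dict.empty, PySem.Dict.empty)) = pvAbs n (pvR n) := by
  refine Eq.trans (PySem.List.foldl_prod_mk (fun d (idx : Int) => d.insert idx idx)
    (fun d (idx : Int) => d.insert idx idx) (pvR n) PySem.Dict.empty PySem.Dict.empty) ?_
  have hbase : (pvR n).foldl (fun (d : PySem.Dict Int Int) (idx : Int) => d.insert idx idx)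
      PySem.Dict.empty = pvCanon n (fun i => (i : Int)) := by
    apply PySem.Dict.ext
    rw [PySem.Dict.items_foldl_insert_fresh (k := fun a => a) (v := fun a => a)]
    · show [] ++ (pvR n).map _ = (List.range n).map _
      rw [List.nil_append]
      simp [pvR, List.map_map]
    · intro a _; rfl
    · simpa using pvR_nodup n
  have e1 : pvCanon n (fun i => (i : Int))
      = pvCanon n (fun i => (((pvR n).idxOf (i : Int) : Nat) : Int)) :=
    pvCanon_congr _ _ _ (fun i hi => by rw [pvR_idxOf n i hi])
  have e2 : pvCanon n (fun i => (i : Int)) = pvCanon n (fun i => (pvR n).getD i 0) :=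
    pvCanon_congr _ _ _ (fun i hi => (pvR_getD n i hi).symm)
  rw [hbase]
  unfold pvAbs
  rw [← e1, ← e2]

-- extracting the result
lemma pvFinal_eq (n : Nat) (order : List Int) (hperm : order.Perm (pvR n)) (f : Int → Int) :
    (pvAbs n order).2.values.map f = order.map f := by
  have hlen : order.length = n := hperm.length_eq.trans (pvR_length n)
  show (pvCanon n _).values.map f = _
  rw [pvCanon_values, pvGetD_range_self order n hlen]

-- ===== VERDICT (by name: the statement is the Claim_ definition above) =====
theorem get_mixed_encrypted_file_spec : Claim_equal_get_mixed_encrypted_file := by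
  intro data num_of_iterations multiplier _ hpre
  unfold Spec_get_mixed_encrypted_file
  unfold get_mixed_encrypted_file get_mixed_encrypted_file_alt
  have hlen : PySem.List.len data = ((data.length : Nat) : Int) := PySem.List.len_eq data
  have hR : PySem.List.pyRange 0 ((data.length : Nat) : Int) = pvR data.length := by
    rw [PySem.List.pyRange_zero_nat]; rfl
  simp only [hlen, hR, pvInit_eq]
  by_cases hone : data.length = 1
  · have hit : num_of_iterations ≤ 0 := by
      by_contra hq
      exact hpre ⟨hone, by omega⟩
    rw [PySem.List.pyRange_one_eq_nil (by omega : num_of_iterations ≤ 0)]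
    simp only [List.foldl_nil]
    exact pvFinal_eq data.length (pvR data.length) (List.Perm.refl _) _
  · have hcase : data.length = 0 ∨ 2 ≤ data.length := by omega
    obtain ⟨hEq, hPerm⟩ := pvIter_sim data multiplier data.length hcase
      (PySem.List.pyRange 0 num_of_iterations) (pvR data.length) (List.Perm.refl _)
    rw [hEq]
    exact pvFinal_eq data.length _ hPerm _
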